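-- pv_equiv track=rewrite | github.com/gplatono/SpatialQA | parser.py | is_plural
-- ===== SOURCE A (Python) =====
-- arguments = ['bed', 'picture', 'poster', 'lamp', 'cardbox', 'box', 'lamp', 'table', 'block', 'book', 'chair', 'bookshelf', 'ceiling light', 'ceiling fan', 'desk', 'sofa', 'tv', 'trash bin', 'pencil', 'laptop', 'apple', 'bowl', 'plate', 'banana', 'pencil holder', 'note', 'west', 'east', 'north', 'wall', 'ceiling', 'floor', 'vase', 'rose']
--
-- parts = ['1', '2', '3', '4', '5', '6', '7', '8', '9', '10', '11', '12', 'pencil', 'holder', 'east', 'north', 'west', 'ceiling', 'trash', 'bin', 'wall', 'light', 'fan', 'trash']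
--
-- def is_plural(word):
--     for w in arguments:
--         if word != w and word[:-1] == w and word[-1] == 's' or word[:-3] + 'f' == w or \
--            word[:-2] == w and word[-2:-1] == "es":
--             return True
--     for w in parts:
--         if word != w and word[:-1] == w and word[-1] == 's' or word[:-3] + 'f' == w or \
--            word[:-2] == w and word[-2:-1] == "es":
--             return True
--     return False
-- ===== SOURCE B (Python) =====
-- arguments = ['bed', 'picture', 'poster', 'lamp', 'cardbox', 'box', 'lamp', 'table', 'block', 'book', 'chair', 'bookshelf', 'ceiling light', 'ceiling fan', 'desk', 'sofa', 'tv', 'trash bin', 'pencil', 'laptop', 'apple', 'bowl', 'plate', 'banana', 'pencil holder', 'note', 'west', 'east', 'north', 'wall', 'ceiling', 'floor', 'vase', 'rose']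
--
-- parts = ['1', '2', '3', '4', '5', '6', '7', '8', '9', '10', '11', '12', 'pencil', 'holder', 'east', 'north', 'west', 'ceiling', 'trash', 'bin', 'wall', 'light', 'fan', 'trash']
--
-- known = set(arguments + parts)
--
-- def is_plural(word):
--     return (bool(word) and word[-1] == 's' and word[:-1] in known) or (word[:-3] + 'f' in known)
-- ===== Notes on version B (the rewrite author's own statement) =====
-- stated objective: simpler
-- what changed: Replaces A's two sequential scans, each re-deriving the candidate singular forms of word against every list element (with a dead 'es' branch), by a precomputed set of all known nouns and two membership tests of the candidate forms word[:-1] (when word ends in 's') and word[:-3]+'f'.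
import Mathlib
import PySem

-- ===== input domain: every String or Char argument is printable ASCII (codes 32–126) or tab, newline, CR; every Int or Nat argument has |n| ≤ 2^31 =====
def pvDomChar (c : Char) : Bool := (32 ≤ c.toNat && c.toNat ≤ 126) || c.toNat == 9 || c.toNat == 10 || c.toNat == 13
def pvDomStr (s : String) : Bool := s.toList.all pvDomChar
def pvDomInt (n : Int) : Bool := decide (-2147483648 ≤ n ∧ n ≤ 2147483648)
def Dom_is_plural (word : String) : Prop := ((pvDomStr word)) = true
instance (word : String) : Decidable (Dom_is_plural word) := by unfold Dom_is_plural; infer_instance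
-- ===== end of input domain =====

-- B replaces A's two linear scans (each re-deriving candidate singular forms per list element)
-- by one precomputed set of known nouns and two membership tests of the candidate forms; objective: simpler.

-- module-level constants shared by both versions
def pvArguments : List String := ["bed", "picture", "poster", "lamp", "cardbox", "box", "lamp", "table", "block", "book", "chair", "bookshelf", "ceiling light", "ceiling fan", "desk", "sofa", "tv", "trash bin", "pencil", "laptop", "apple", "bowl", "plate", "banana", "pencil holder", "note", "west", "east", "north", "wall", "ceiling", "floor", "vase", "rose"]

def pvParts : List String := ["1", "2", "3", "4", "5", "6", "7", "8", "9", "10", "11", "12", "pencil", "holder", "east", "north", "west", "ceiling", "trash", "bin", "wall", "light", "fan", "trash"]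

-- ===== PORT A =====
-- the loop-body condition of A, verbatim (strings as List Char; '+' on str is ++)
def pvCondA (word w : String) : Bool :=
  ((word != w) && (PySem.List.slice word.toList none (some (-1)) == w.toList)
      && (PySem.List.pyGet? word.toList (-1) == some 's'))
  || (PySem.List.slice word.toList none (some (-3)) ++ ['f'] == w.toList)
  || ((PySem.List.slice word.toList none (some (-2)) == w.toList)
      && (PySem.List.slice word.toList (some (-2)) (some (-1)) == (['e', 's'] : List Char)))

-- 'for w in ws: if cond: return True'
def pvLoopA (word : String) : List String → Bool
  | [] => false
  | w :: ws => if pvCondA word w then true else pvLoopA word ws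

def is_plural (word : String) : Bool :=
  if pvLoopA word pvArguments then true
  else if pvLoopA word pvParts then true
  else false

-- ===== PORT B =====
-- known = set(arguments + parts)  (a set of strings; strings modelled as List Char)
def pvKnown : PySem.Set (List Char) :=
  PySem.Set.ofList ((pvArguments ++ pvParts).map String.toList)

def is_plural_alt (word : String) : Bool :=
  ((!word.toList.isEmpty) && (PySem.List.pyGet? word.toList (-1) == some 's')
      && pvKnown.contains (PySem.List.slice word.toList none (some (-1))))
  || pvKnown.contains (PySem.List.slice word.toList none (some (-3)) ++ ['f'])

-- ===== PRECONDITION & SPEC =====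
def Spec_is_plural (word : String) (out : Bool) : Prop := out = is_plural_alt word
instance (word : String) (out : Bool) : Decidable (Spec_is_plural word out) := by unfold Spec_is_plural; infer_instance

-- ===== CLAIM (what is proved, stated in full; the proofs are below) =====
def Claim_equal_is_plural : Prop := ∀ (word : String), Dom_is_plural word → Spec_is_plural word (is_plural word)

-- ===== LEMMAS AND PROOFS =====

-- A's early-return loop is List.any
theorem pvLoopA_eq_any (word : String) (ws : List String) :
    pvLoopA word ws = ws.any (pvCondA word) := by
  induction ws with
  | nil => rfl
  | cons w ws ih => by_cases h : pvCondA word w = true <;> simp [pvLoopA, h, ih]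

-- the third disjunct of A's condition never fires: word[-2:-1] has length ≤ 1
theorem pvThird_false (cs : List Char) :
    (PySem.List.slice cs (some (-2)) (some (-1)) == (['e', 's'] : List Char)) = false := by
  apply beq_eq_false_iff_ne.mpr
  intro h
  have hlen := PySem.List.length_slice cs (-2) (-1)
  rw [h] at hlen
  have h1 : PySem.List.clampIdx cs.length (-1) = cs.length - 1 := by simp [pysem]
  have h2 : PySem.List.clampIdx cs.length (-2) = cs.length - 2 := by simp [pysem]
  rw [h1, h2] at hlen
  simp at hlen
  omega

-- a word with last letter 's' whose dropLast equals w cannot itself equal w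
theorem pvNe_of (word w : String) (hs : PySem.List.pyGet? word.toList (-1) = some 's')
    (hd : word.toList.dropLast = w.toList) : word ≠ w := by
  intro he
  have hne : word.toList ≠ [] := by
    intro h0; rw [h0] at hs; simp [PySem.List.pyGet?, PySem.List.pyIdx?] at hs
  have hlen : word.toList.dropLast.length = word.toList.length := by rw [hd, he]
  rw [List.length_dropLast] at hlen
  have h0 : word.toList.length ≠ 0 := fun h0 => hne (List.length_eq_zero_iff.mp h0)
  omega

-- A's condition, for a nonempty w, in B's shape
theorem pvCondA_eq (word w : String) :
    pvCondA word w =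
      (((PySem.List.pyGet? word.toList (-1) == some 's')
          && (PySem.List.slice word.toList none (some (-1)) == w.toList))
        || (PySem.List.slice word.toList none (some (-3)) ++ ['f'] == w.toList)) := by
  unfold pvCondA
  rw [pvThird_false]
  by_cases hs : PySem.List.pyGet? word.toList (-1) = some 's'
  · by_cases hd : PySem.List.slice word.toList none (some (-1)) = w.toList
    · have hne := pvNe_of word w hs (by rw [← PySem.List.slice_to_neg_one]; exact hd)
      simp [hs, hd, hne]
    · have hd' : (PySem.List.slice word.toList none (some (-1)) == w.toList) = false :=
        beq_eq_false_iff_ne.mpr hd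
      simp [hd']
  · have hs' : (PySem.List.pyGet? word.toList (-1) == some 's') = false :=
      beq_eq_false_iff_ne.mpr hs
    simp [hs']

theorem pvMem_known (x : List Char) :
    pvKnown.contains x = true ↔ ∃ w ∈ pvArguments ++ pvParts, x = w.toList := by
  unfold pvKnown
  rw [PySem.Set.contains_iff, PySem.Set.mem_ofList, List.mem_map]
  constructor
  · rintro ⟨w, hw, rfl⟩; exact ⟨w, hw, rfl⟩
  · rintro ⟨w, hw, rfl⟩; exact ⟨w, hw, rfl⟩

-- ===== VERDICT (by name: the statement is the Claim_ definition above) =====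
theorem is_plural_spec : Claim_equal_is_plural := by
  intro word _
  unfold Spec_is_plural
  rw [Bool.eq_iff_iff]
  have hA : is_plural word = (pvArguments ++ pvParts).any (pvCondA word) := by
    unfold is_plural
    rw [pvLoopA_eq_any, pvLoopA_eq_any, List.any_append]
    cases pvArguments.any (pvCondA word) <;> cases pvParts.any (pvCondA word) <;> simp
  rw [hA]
  unfold is_plural_alt
  constructor
  · intro h
    rw [List.any_eq_true] at h
    obtain ⟨w, hw, hc⟩ := h
    rw [pvCondA_eq word w] at hc
    rcases Bool.or_eq_true_iff.mp hc with h1 | h2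
    · have ⟨hs, hd⟩ := Bool.and_eq_true_iff.mp h1
      have hne : word.toList ≠ [] := by
        intro h0
        rw [h0] at hs
        simp [PySem.List.pyGet?, PySem.List.pyIdx?] at hs
      apply Bool.or_eq_true_iff.mpr; left
      refine Bool.and_eq_true_iff.mpr ⟨Bool.and_eq_true_iff.mpr ⟨by simp [hne], hs⟩, ?_⟩
      exact (pvMem_known _).mpr ⟨w, hw, by simpa using eq_of_beq hd⟩
    · apply Bool.or_eq_true_iff.mpr; right
      exact (pvMem_known _).mpr ⟨w, hw, by simpa using eq_of_beq h2⟩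
  · intro h
    rw [List.any_eq_true]
    rcases Bool.or_eq_true_iff.mp h with h1 | h2
    · have ⟨h12, hm⟩ := Bool.and_eq_true_iff.mp h1
      have ⟨_, hs⟩ := Bool.and_eq_true_iff.mp h12
      obtain ⟨w, hw, he⟩ := (pvMem_known _).mp hm
      refine ⟨w, hw, ?_⟩
      rw [pvCondA_eq word w]
      apply Bool.or_eq_true_iff.mpr; left
      exact Bool.and_eq_true_iff.mpr ⟨hs, by simp [he]⟩
    · obtain ⟨w, hw, he⟩ := (pvMem_known _).mp h2
      refine ⟨w, hw, ?_⟩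
      rw [pvCondA_eq word w]
      apply Bool.or_eq_true_iff.mpr; right
      simp [he]
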